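-- pv_equiv track=rewrite | github.com/robman/FRESH-model | benchmarks/curved-inference/03/bin/response-classifier-via-api.py | validate_moles_result
-- ===== SOURCE A (Python) =====
-- def validate_moles_result(result_dict: dict) -> bool:
--     """Validate that all MOLES classifications are Y or N"""
--     required_fields = [
--         'contains_self_experience', 'contains_self_model', 'contains_self_delusion',
--         'contains_self_uncertainty', 'contains_factual_response', 'contains_hallucination',
--         'contains_theory_of_mind', 'contains_imaginative_construction',
--         'contains_interpretive_inference', 'contains_semantic_overfitting',
--         'shows_computational_work', 'primary_stance', 'confidence_level'
--     ]
--
--     binary_fields = [f for f in required_fields if f not in ['primary_stance', 'confidence_level']]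
--
--     for field in binary_fields:
--         if field not in result_dict:
--             return False
--         if result_dict[field] not in ['Y', 'N']:
--             return False
--
--     # Validate categorical fields
--     valid_stances = [
--         'factual_response', 'hallucination', 'self_experience', 'self_model',
--         'self_delusion', 'self_uncertainty', 'theory_of_mind', 'imaginative_construction',
--         'interpretive_inference', 'semantic_overfitting', 'computational_work'
--     ]
--     valid_confidence = ['confident', 'uncertain', 'mixed']
--
--     if result_dict.get('primary_stance') not in valid_stances:
--         return False
--     if result_dict.get('confidence_level') not in valid_confidence:
--         return False
--
--     return True
-- ===== SOURCE B (Python) =====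
-- def validate_moles_result(result_dict: dict) -> bool:
--     """Validate that all MOLES classifications are Y or N.
--
--     One pass over the dict's own items, ticking required fields off a
--     'missing' set; valid iff nothing required remains missing."""
--     allowed = {
--         'primary_stance': [
--             'factual_response', 'hallucination', 'self_experience', 'self_model',
--             'self_delusion', 'self_uncertainty', 'theory_of_mind', 'imaginative_construction',
--             'interpretive_inference', 'semantic_overfitting', 'computational_work'
--         ],
--         'confidence_level': ['confident', 'uncertain', 'mixed'],
--     }
--     for f in ['contains_self_experience', 'contains_self_model', 'contains_self_delusion',
--               'contains_self_uncertainty', 'contains_factual_response', 'contains_hallucination',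
--               'contains_theory_of_mind', 'contains_imaginative_construction',
--               'contains_interpretive_inference', 'contains_semantic_overfitting',
--               'shows_computational_work']:
--         allowed[f] = ['Y', 'N']
--     missing = set(allowed)
--     for key, value in result_dict.items():
--         if key in missing and value in allowed[key]:
--             missing.discard(key)
--     return not missing
-- ===== Notes on version B (the rewrite author's own statement) =====
-- stated objective: alternative
-- what changed: Instead of looping over the required-field list and looking each field up in the dict, B makes one pass over the dict's own items, discarding each valid required field from a 'missing' set initialised to the schema's keys, and returns whether that set emptied.
import Mathlib
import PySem

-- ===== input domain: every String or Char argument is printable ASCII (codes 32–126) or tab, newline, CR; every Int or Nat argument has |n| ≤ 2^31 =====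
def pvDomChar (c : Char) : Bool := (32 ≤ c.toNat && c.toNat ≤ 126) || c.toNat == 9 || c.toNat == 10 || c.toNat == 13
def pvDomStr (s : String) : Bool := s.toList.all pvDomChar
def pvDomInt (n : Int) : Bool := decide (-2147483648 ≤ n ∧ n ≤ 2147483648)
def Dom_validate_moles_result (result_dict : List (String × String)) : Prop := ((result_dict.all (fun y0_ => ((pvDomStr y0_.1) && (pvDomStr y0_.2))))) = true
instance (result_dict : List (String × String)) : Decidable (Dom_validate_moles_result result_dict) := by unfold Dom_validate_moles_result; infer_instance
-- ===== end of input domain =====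

-- B replaces A's loop over the required-field list (with a dict lookup per field) by one
-- pass over the dict's own items that ticks valid fields off a 'missing' set (objective: alternative).

-- ===== PORT A =====
def pvA_required_fields : List String :=
  ["contains_self_experience", "contains_self_model", "contains_self_delusion",
   "contains_self_uncertainty", "contains_factual_response", "contains_hallucination",
   "contains_theory_of_mind", "contains_imaginative_construction",
   "contains_interpretive_inference", "contains_semantic_overfitting",
   "shows_computational_work", "primary_stance", "confidence_level"]

def pvA_valid_stances : List String :=
  ["factual_response", "hallucination", "self_experience", "self_model",
   "self_delusion", "self_uncertainty", "theory_of_mind", "imaginative_construction",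
   "interpretive_inference", "semantic_overfitting", "computational_work"]

def pvA_valid_confidence : List String := ["confident", "uncertain", "mixed"]

-- A's 'for field in binary_fields' loop with its two early returns
def pvA_binLoop (result_dict : List (String × String)) : List String → Bool
  | [] => true
  | f :: fs =>
    match PySem.Dict.get? (PySem.Dict.mk result_dict) f with
    | none => false                                    -- 'if field not in result_dict: return False'
    | some v =>
      if !(["Y", "N"].contains v) then false           -- 'if result_dict[field] not in [Y,N]: return False'
      else pvA_binLoop result_dict fs

def validate_moles_result (result_dict : List (String × String)) : Bool :=
  let binary_fields :=
    pvA_required_fields.filter (fun f => !(["primary_stance", "confidence_level"].contains f))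
  if !(pvA_binLoop result_dict binary_fields) then false
  else if !((PySem.Dict.get? (PySem.Dict.mk result_dict) "primary_stance").elim false
              (fun v => pvA_valid_stances.contains v)) then false  -- None is not in the list
  else if !((PySem.Dict.get? (PySem.Dict.mk result_dict) "confidence_level").elim false
              (fun v => pvA_valid_confidence.contains v)) then false
  else true

-- ===== PORT B =====
def pvB_binary_fields : List String :=
  ["contains_self_experience", "contains_self_model", "contains_self_delusion",
   "contains_self_uncertainty", "contains_factual_response", "contains_hallucination",
   "contains_theory_of_mind", "contains_imaginative_construction",
   "contains_interpretive_inference", "contains_semantic_overfitting",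
   "shows_computational_work"]

-- the 'allowed' schema: categorical entries, then 'allowed[f] = [Y,N]' for the binary fields
def pvB_allowed : PySem.Dict String (List String) :=
  pvB_binary_fields.foldl (fun d f => d.insert f ["Y", "N"])
    (PySem.Dict.ofList
      [("primary_stance",
        ["factual_response", "hallucination", "self_experience", "self_model",
         "self_delusion", "self_uncertainty", "theory_of_mind", "imaginative_construction",
         "interpretive_inference", "semantic_overfitting", "computational_work"]),
       ("confidence_level", ["confident", "uncertain", "mixed"])])

-- loop body: 'if key in missing and value in allowed[key]: missing.discard(key)'
def pvB_step (missing : PySem.Set String) (kv : String × String) : PySem.Set String :=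
  if PySem.Set.contains missing kv.1 && (pvB_allowed.getD kv.1 []).contains kv.2 then
    PySem.Set.discard missing kv.1
  else missing

def validate_moles_result_alt (result_dict : List (String × String)) : Bool :=
  let missing := result_dict.foldl pvB_step (PySem.Set.ofList pvB_allowed.keys)
  missing.isEmpty

-- ===== PRECONDITION & SPEC =====
-- Pre_ excludes association lists with duplicate keys: a Python dict argument can never
-- contain them, and such lists have no unambiguous dict reading (first vs last match).
def Pre_validate_moles_result (result_dict : List (String × String)) : Prop :=
  (result_dict.map Prod.fst).Nodup
instance (result_dict : List (String × String)) : Decidable (Pre_validate_moles_result result_dict) := by unfold Pre_validate_moles_result; infer_instance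

def pvWitness_validate_moles_result : (List (String × String)) :=
  [("primary_stance", "mixed"), ("confidence_level", "confident")]

def Spec_validate_moles_result (result_dict : List (String × String)) (out : Bool) : Prop := out = validate_moles_result_alt result_dict
instance (result_dict : List (String × String)) (out : Bool) : Decidable (Spec_validate_moles_result result_dict out) := by unfold Spec_validate_moles_result; infer_instance

-- ===== CLAIM =====
def Claim_equal_validate_moles_result : Prop := ∀ (result_dict : List (String × String)), Dom_validate_moles_result result_dict → Pre_validate_moles_result result_dict → Spec_validate_moles_result result_dict (validate_moles_result result_dict)

-- ===== LEMMAS AND PROOFS =====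

-- 'field f is present with an allowed value' (A's view, first-match lookup)
def pvCheck (d : List (String × String)) (p : String × List String) : Bool :=
  match PySem.Dict.get? (PySem.Dict.mk d) p.1 with
  | some v => p.2.contains v
  | none => false

-- 'some item of d is (f, allowed value)' (B's view, scanning the items)
def pvAnyGood (d : List (String × String)) (f : String) : Bool :=
  d.any (fun kv => kv.1 == f && (pvB_allowed.getD kv.1 []).contains kv.2)

-- A's binary loop over a field list = all-check with allowed = [Y,N]
theorem pvA_binLoop_eq_all (d : List (String × String)) (fs : List String) :
    pvA_binLoop d fs = (fs.map (fun f => (f, ["Y", "N"]))).all (pvCheck d) := by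
  induction fs with
  | nil => rfl
  | cons f fs ih =>
    simp only [pvA_binLoop, List.map_cons, List.all_cons]
    rw [ih]
    cases hg : PySem.Dict.get? (PySem.Dict.mk d) f with
    | none => simp [pvCheck, hg]
    | some v =>
      rw [show pvCheck d (f, ["Y", "N"]) = ["Y", "N"].contains v from by simp [pvCheck, hg]]
      by_cases h : (["Y", "N"].contains v) = true <;> simp

-- with distinct keys, A's first-match check agrees with B's scan of the items
theorem pvCheck_eq_anyGood (d : List (String × String)) (f : String)
    (hnd : (d.map Prod.fst).Nodup) :
    pvCheck d (f, pvB_allowed.getD f []) = pvAnyGood d f := by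
  induction d with
  | nil => rfl
  | cons kv rest ih =>
    obtain ⟨k, v⟩ := kv
    simp only [List.map_cons, List.nodup_cons] at hnd
    have ihr := ih hnd.2
    simp only [pvCheck, pvAnyGood, List.any_cons, PySem.Dict.get?_mk_cons] at ihr ⊢
    by_cases hk : k = f
    · subst hk
      have hrest : (rest.any fun kv => kv.1 == k && (pvB_allowed.getD kv.1 []).contains kv.2) = false := by
        rw [List.any_eq_false]
        intro kv hkv
        have hne : kv.1 ≠ k := fun h => hnd.1 (h ▸ List.mem_map_of_mem hkv)
        rw [Bool.and_eq_true, beq_iff_eq]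
        exact fun h => hne h.1
      rw [hrest, if_pos (by simp), Bool.or_false, beq_self_eq_true, Bool.true_and]
    · have h1 : (k == f) = false := by simp [hk]
      rw [if_neg (by simp [hk]), ihr, h1, Bool.false_and, Bool.false_or]

-- B's loop: each item can only tick its own key off 'missing', so the loop filters
-- 'missing' down to the fields no item of d validates
theorem pvB_foldl_eq_filter (d : List (String × String)) (m : PySem.Set String)
    (hm : m.Nodup) :
    d.foldl pvB_step m = m.filter (fun f => !(pvAnyGood d f)) := by
  induction d generalizing m with
  | nil => simp [pvAnyGood]
  | cons kv rest ih =>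
    obtain ⟨k, v⟩ := kv
    simp only [List.foldl_cons]
    by_cases hc : (PySem.Set.contains m k && (pvB_allowed.getD k []).contains v) = true
    · have hstep : pvB_step m (k, v) = PySem.Set.discard m k := by
        unfold pvB_step; rw [if_pos hc]
      obtain ⟨-, hgood⟩ : PySem.Set.contains m k = true ∧ (pvB_allowed.getD k []).contains v = true := by
        simpa using hc
      rw [hstep, ih _ (PySem.Set.nodup_discard m k hm)]
      simp only [PySem.Set.discard, List.filter_filter]
      apply List.filter_congr
      intro f hf
      simp only [pvAnyGood, List.any_cons]
      by_cases hkf : k = f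
      · subst hkf
        simp only [beq_self_eq_true, Bool.true_and]
        simp
        exact fun h => absurd (by simpa using hgood) h
      · have h1 : (k == f) = false := by simp [hkf]
        have h2 : (f == k) = false := by simp [Ne.symm hkf]
        rw [h1, h2, Bool.false_and, Bool.false_or]
        simp
    · have hstep : pvB_step m (k, v) = m := by
        unfold pvB_step; rw [if_neg hc]
      rw [hstep, ih _ hm]
      apply List.filter_congr
      intro f hf
      have hkg : (k == f && (pvB_allowed.getD k []).contains v) = false := by
        by_cases hkf : k = f
        · subst hkf
          have hcont : PySem.Set.contains m k = true := (PySem.Set.contains_iff m k).mpr hf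
          cases hgv : (pvB_allowed.getD k []).contains v
          · simp
          · exact absurd (by simp; exact ⟨hf, by simpa using hgv⟩) hc
        · simp [hkf]
      simp only [pvAnyGood, List.any_cons, hkg, Bool.false_or]

-- (filter (!p)).isEmpty = all p
theorem pv_isEmpty_filter_not {α : Type} (l : List α) (p : α → Bool) :
    (l.filter (fun x => !(p x))).isEmpty = l.all p := by
  induction l with
  | nil => rfl
  | cons x xs ih => cases h : p x <;> simp [h, ih]

-- A's two categorical guards, written as pvCheck with B's schema lists
theorem pv_stance_eq (d : List (String × String)) :
    (PySem.Dict.get? (PySem.Dict.mk d) "primary_stance").elim false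
      (fun v => pvA_valid_stances.contains v)
      = pvCheck d ("primary_stance", pvB_allowed.getD "primary_stance" []) := by
  have hL : pvB_allowed.getD "primary_stance" [] = pvA_valid_stances := by decide
  rw [hL]
  cases hg : PySem.Dict.get? (PySem.Dict.mk d) "primary_stance" <;> simp [pvCheck, hg]

theorem pv_conf_eq (d : List (String × String)) :
    (PySem.Dict.get? (PySem.Dict.mk d) "confidence_level").elim false
      (fun v => pvA_valid_confidence.contains v)
      = pvCheck d ("confidence_level", pvB_allowed.getD "confidence_level" []) := by
  have hL : pvB_allowed.getD "confidence_level" [] = pvA_valid_confidence := by decide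
  rw [hL]
  cases hg : PySem.Dict.get? (PySem.Dict.mk d) "confidence_level" <;> simp [pvCheck, hg]

-- ===== VERDICT =====
theorem validate_moles_result_spec : Claim_equal_validate_moles_result := by
  intro d _ hpre
  unfold Spec_validate_moles_result validate_moles_result validate_moles_result_alt
  -- B side: the loop filters 'missing'; emptiness = every required field validated
  rw [pvB_foldl_eq_filter d _ (by decide), pv_isEmpty_filter_not]
  have hperm : (PySem.Set.ofList pvB_allowed.keys).Perm pvA_required_fields := by decide
  rw [hperm.all_eq]
  have hanys : pvAnyGood d = fun f => pvCheck d (f, pvB_allowed.getD f []) := by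
    funext f; exact (pvCheck_eq_anyGood d f hpre).symm
  rw [hanys]
  have hmap : pvA_required_fields.all (fun f => pvCheck d (f, pvB_allowed.getD f []))
      = (pvA_required_fields.map (fun f => (f, pvB_allowed.getD f []))).all (pvCheck d) := by
    rw [List.all_map]; rfl
  rw [hmap]
  have hschema : pvA_required_fields.map (fun f => (f, pvB_allowed.getD f []))
      = pvB_binary_fields.map (fun f => (f, ["Y", "N"]))
        ++ [("primary_stance", pvB_allowed.getD "primary_stance" []),
            ("confidence_level", pvB_allowed.getD "confidence_level" [])] := by decide
  rw [hschema]
  -- A side: the binary loop and the two guards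
  have hfilter :
      pvA_required_fields.filter
        (fun f => !(["primary_stance", "confidence_level"].contains f)) = pvB_binary_fields := by
    decide
  rw [hfilter]
  simp only [pvA_binLoop_eq_all, pv_stance_eq, pv_conf_eq, List.all_append, List.all_cons,
             List.all_nil]
  generalize (pvB_binary_fields.map (fun f => (f, ["Y", "N"]))).all (pvCheck d) = a
  generalize pvCheck d ("primary_stance", pvB_allowed.getD "primary_stance" []) = s
  generalize pvCheck d ("confidence_level", pvB_allowed.getD "confidence_level" []) = c
  cases a <;> cases s <;> cases c <;> rfl
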